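-- pv_equiv track=rewrite | github.com/Lg-Ue/evaluacionPractica2VA | examenPractico2.py | agregaBordesFiltroEscalaGrises
-- ===== SOURCE A (Python) =====
-- def agregaBordesFiltroEscalaGrises(filasFiltro, columnasFiltro, imagen):
--   # Variables de la imagen
--   filasImagen = len(imagen)
--   columnasImagen = len(imagen[0])
--   # Variables de los bordes
--   filasBorde = (filasFiltro - 1) // 2
--   columnasBorde = (columnasFiltro - 1) // 2
--   # Variables de la imagen con bordes
--   filasImagenBordes = filasBorde + filasImagen + filasBorde;
--   columnasImagenBordes = columnasBorde + columnasImagen + columnasBorde;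
--   imagenBordes = [[0] * columnasImagenBordes for i in range(filasImagenBordes)]
--   for i in range(filasImagen): # Para cada fila
--     for j in range(columnasImagen): # Para cada columna
--       # Copia la imagen
--       valorGris = imagen[i][j]
--       imagenBordes[filasBorde + i][columnasBorde + j] = valorGris
--   return imagenBordes
-- ===== SOURCE B (Python) =====
-- def agregaBordesFiltroEscalaGrises(filasFiltro, columnasFiltro, imagen):
--   # Assemble the padded image from blocks instead of allocating zeros and overwriting;
--   # the first row fixes the output width.
--   filasBorde = (filasFiltro - 1) // 2
--   columnasBorde = (columnasFiltro - 1) // 2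
--   ancho = len(imagen[0])
--   anchura = columnasBorde + ancho + columnasBorde
--   centro = [[0] * columnasBorde + fila[:ancho] + [0] * columnasBorde for fila in imagen]
--   arriba = [[0] * anchura for _ in range(filasBorde)]
--   abajo = [[0] * anchura for _ in range(filasBorde)]
--   return arriba + centro + abajo
-- ===== Notes on version B (the rewrite author's own statement) =====
-- stated objective: simpler
-- what changed: B assembles the padded image by concatenating blocks (top zero rows ++ per-row [zeros ++ row ++ zeros] ++ bottom zero rows) instead of allocating a zero matrix and overwriting cells with nested index assignments.
-- outside the precondition, e.g. on agregaBordesFiltroEscalaGrises(0, 1, [[], [], []]): A returns [[]], B returns [[], [], []]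
import Mathlib
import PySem

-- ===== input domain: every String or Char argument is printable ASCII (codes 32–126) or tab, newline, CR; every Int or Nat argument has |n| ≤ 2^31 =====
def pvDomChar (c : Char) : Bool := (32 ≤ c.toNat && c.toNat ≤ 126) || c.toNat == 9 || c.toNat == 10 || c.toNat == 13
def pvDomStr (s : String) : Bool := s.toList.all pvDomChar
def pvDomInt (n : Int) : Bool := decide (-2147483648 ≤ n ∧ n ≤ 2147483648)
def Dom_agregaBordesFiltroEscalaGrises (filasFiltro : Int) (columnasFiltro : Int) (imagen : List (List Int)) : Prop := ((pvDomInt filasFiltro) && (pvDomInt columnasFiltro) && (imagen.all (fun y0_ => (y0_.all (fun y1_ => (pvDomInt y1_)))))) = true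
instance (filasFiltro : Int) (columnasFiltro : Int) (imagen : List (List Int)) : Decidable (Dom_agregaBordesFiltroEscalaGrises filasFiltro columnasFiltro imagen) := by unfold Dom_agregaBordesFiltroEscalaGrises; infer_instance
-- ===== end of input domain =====

-- B assembles the padded image by concatenating blocks (top zero rows, per-row zeros++row++zeros, bottom
-- zero rows) instead of allocating a zero matrix and overwriting cells; same cost, simpler decomposition.


-- ===== PORT A =====
def agregaBordesFiltroEscalaGrises (filasFiltro : Int) (columnasFiltro : Int) (imagen : List (List Int)) : List (List Int) :=
  let filasImagen : Int := imagen.length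
  let columnasImagen : Int := (PySem.List.pyGetD imagen 0 []).length  -- imagen[0]; in range under Pre_
  let filasBorde := PySem.Int.floordiv (filasFiltro - 1) 2
  let columnasBorde := PySem.Int.floordiv (columnasFiltro - 1) 2
  let filasImagenBordes := filasBorde + filasImagen + filasBorde
  let columnasImagenBordes := columnasBorde + columnasImagen + columnasBorde
  let imagenBordes := (PySem.List.pyRange 0 filasImagenBordes 1).map
      (fun _ => List.replicate columnasImagenBordes.toNat (0 : Int))
  (PySem.List.pyRange 0 filasImagen 1).foldl (fun acc i =>
    (PySem.List.pyRange 0 columnasImagen 1).foldl (fun acc2 j =>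
      let valorGris := PySem.List.pyGetD (PySem.List.pyGetD imagen i []) j 0
      PySem.List.pySetD acc2 (filasBorde + i)
        (PySem.List.pySetD (PySem.List.pyGetD acc2 (filasBorde + i) []) (columnasBorde + j) valorGris))
      acc)
    imagenBordes

-- ===== PORT B =====
def agregaBordesFiltroEscalaGrises_alt (filasFiltro : Int) (columnasFiltro : Int) (imagen : List (List Int)) : List (List Int) :=
  let filasBorde := PySem.Int.floordiv (filasFiltro - 1) 2
  let columnasBorde := PySem.Int.floordiv (columnasFiltro - 1) 2
  let ancho : Int := (PySem.List.pyGetD imagen 0 []).length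
  let anchura := columnasBorde + ancho + columnasBorde
  let centro := imagen.map (fun fila =>
      List.replicate columnasBorde.toNat (0 : Int) ++ PySem.List.slice fila none (some ancho)
        ++ List.replicate columnasBorde.toNat (0 : Int))
  let arriba := (PySem.List.pyRange 0 filasBorde 1).map (fun _ => List.replicate anchura.toNat (0 : Int))
  let abajo := (PySem.List.pyRange 0 filasBorde 1).map (fun _ => List.replicate anchura.toNat (0 : Int))
  arriba ++ centro ++ abajo

-- ===== PRECONDITION & SPEC =====
-- Pre_ excludes: empty images and rows shorter than the first row (A raises IndexError there), and
-- non-positive filter sizes, where A's negative border width raises IndexError or, on width-0 degenerate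
-- images, A's negative-range allocation returns an accidental shape.
def Pre_agregaBordesFiltroEscalaGrises (filasFiltro : Int) (columnasFiltro : Int) (imagen : List (List Int)) : Prop :=
  imagen ≠ [] ∧ (∀ row ∈ imagen, (imagen.headD []).length ≤ row.length) ∧ 1 ≤ filasFiltro ∧ 1 ≤ columnasFiltro
instance (filasFiltro : Int) (columnasFiltro : Int) (imagen : List (List Int)) : Decidable (Pre_agregaBordesFiltroEscalaGrises filasFiltro columnasFiltro imagen) := by unfold Pre_agregaBordesFiltroEscalaGrises; infer_instance

def pvWitness_agregaBordesFiltroEscalaGrises : Int × Int × List (List Int) := (3, 3, [[1, 2], [3, 4]])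

def Spec_agregaBordesFiltroEscalaGrises (filasFiltro : Int) (columnasFiltro : Int) (imagen : List (List Int)) (out : List (List Int)) : Prop := out = agregaBordesFiltroEscalaGrises_alt filasFiltro columnasFiltro imagen
instance (filasFiltro : Int) (columnasFiltro : Int) (imagen : List (List Int)) (out : List (List Int)) : Decidable (Spec_agregaBordesFiltroEscalaGrises filasFiltro columnasFiltro imagen out) := by unfold Spec_agregaBordesFiltroEscalaGrises; infer_instance

-- ===== CLAIM (what is proved, stated in full; the proofs are below) =====
def Claim_equal_agregaBordesFiltroEscalaGrises : Prop := ∀ (filasFiltro : Int) (columnasFiltro : Int) (imagen : List (List Int)), Dom_agregaBordesFiltroEscalaGrises filasFiltro columnasFiltro imagen → Pre_agregaBordesFiltroEscalaGrises filasFiltro columnasFiltro imagen → Spec_agregaBordesFiltroEscalaGrises filasFiltro columnasFiltro imagen (agregaBordesFiltroEscalaGrises filasFiltro columnasFiltro imagen)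

-- ===== LEMMAS AND PROOFS =====

-- reading back the first w entries of a row
theorem pvMapGetDRange (l : List Int) (w : Nat) (hw : w ≤ l.length) :
    (List.range w).map (fun j => l.getD j 0) = l.take w := by
  apply List.ext_getElem
  · simp [hw]
  · intro i h1 h2
    simp only [List.getElem_map, List.getElem_range, List.getD_eq_getElem?_getD,
      List.getElem_take]
    rw [List.getElem?_eq_getElem (by simp at h1 ⊢; omega)]
    rfl

-- L1: writing f 0 .. f (|mid|-1) at offsets |p| + j replaces mid
theorem pvRowWrite (mid : List Int) : ∀ (p suf : List Int) (f : Nat → Int),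
    (List.range mid.length).foldl (fun r j => r.set (p.length + j) (f j)) (p ++ mid ++ suf)
      = p ++ (List.range mid.length).map f ++ suf := by
  induction mid with
  | nil => simp
  | cons x mid ih =>
    intro p suf f
    rw [List.length_cons, List.range_succ_eq_map]
    simp only [List.foldl_cons, List.foldl_map, Nat.add_zero]
    have hset : (p ++ (x :: mid) ++ suf).set p.length (f 0) = (p ++ [f 0]) ++ mid ++ suf := by
      rw [List.append_assoc, List.set_append_right _ _ (le_refl _)]
      simp
    rw [hset]
    have := ih (p ++ [f 0]) suf (fun j => f (j + 1))
    simp only [List.length_append, List.length_singleton] at this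
    have harg : (fun (r : List Int) (j : Nat) => r.set (p.length + (j + 1)) (f (j + 1)))
        = (fun (r : List Int) (j : Nat) => r.set (p.length + 1 + j) (f (j + 1))) := by
      funext r j; ring_nf
    rw [harg, this]
    simp [List.map_map, Function.comp, Nat.succ_eq_add_one]

-- L2: a fold that only rewrites row r commutes with set
theorem pvSetRowFold (js : List Nat) : ∀ (m : List (List Int)) (r : Nat), r < m.length →
    ∀ (cb : Nat) (v : Nat → Int),
    js.foldl (fun acc j => acc.set r ((acc.getD r []).set (cb + j) (v j))) m
      = m.set r (js.foldl (fun row j => row.set (cb + j) (v j)) (m.getD r [])) := by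
  induction js with
  | nil =>
    intro m r hr cb v
    simp only [List.foldl_nil]
    rw [List.getD_eq_getElem _ _ hr, List.set_getElem_self]
  | cons j js ih =>
    intro m r hr cb v
    simp only [List.foldl_cons]
    rw [ih _ r (by simpa using hr) cb v]
    rw [List.getD_eq_getElem _ _ hr, List.getD_eq_getElem _ _ (by simpa using hr)]
    simp [List.getElem_set_self, List.set_set]

-- outer invariant
theorem pvOuter (FB CB w : Nat) (imagen : List (List Int)) (hw : ∀ row ∈ imagen, w ≤ row.length)
    (k : Nat) (hk : k ≤ imagen.length) :
    (List.range k).foldl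
      (fun acc i => (List.range w).foldl
        (fun acc2 j => acc2.set (FB+i) ((acc2.getD (FB+i) []).set (CB+j) ((imagen.getD i []).getD j 0)))
        acc)
      (List.replicate (FB + imagen.length + FB) (List.replicate (CB + w + CB) (0:Int)))
    = List.replicate FB (List.replicate (CB+w+CB) (0:Int))
      ++ (imagen.take k).map (fun fila => List.replicate CB (0:Int) ++ fila.take w ++ List.replicate CB (0:Int))
      ++ List.replicate ((imagen.length - k) + FB) (List.replicate (CB+w+CB) (0:Int)) := by
  set n := imagen.length with hn
  set z : List Int := List.replicate (CB+w+CB) (0:Int) with hz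
  induction k with
  | zero =>
    simp only [List.range_zero, List.foldl_nil, List.take_zero, List.map_nil, Nat.sub_zero]
    rw [show FB + n + FB = FB + (n + FB) by ring, List.replicate_add]
    simp
  | succ k ih =>
    have hk' : k ≤ n := by omega
    rw [List.range_succ, List.foldl_append, ih hk', List.foldl_cons, List.foldl_nil]
    set mid := (imagen.take k).map (fun fila => List.replicate CB (0:Int) ++ fila.take w ++ List.replicate CB (0:Int)) with hmid
    have hlen2 : mid.length = k := by simp [hmid]; omega
    have hlen : (List.replicate FB z ++ mid ++ List.replicate ((n - k) + FB) z).length = FB + n + FB := by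
      simp [hlen2]; omega
    have hget : (List.replicate FB z ++ mid ++ List.replicate ((n - k) + FB) z).getD (FB + k) [] = z := by
      rw [List.getD_append_right _ _ _ _ (by simp [hlen2])]
      rw [List.getD_eq_getElem _ _ (by simp [hlen2]; omega)]
      simp
    rw [pvSetRowFold _ _ _ (by rw [hlen]; omega), hget]
    have hrowk : w ≤ (imagen.getD k []).length := by
      have : imagen.getD k [] ∈ imagen := by
        rw [List.getD_eq_getElem _ _ (by omega)]
        exact List.getElem_mem _
      exact hw _ this
    have hinner : (List.range w).foldl (fun row j => row.set (CB+j) ((imagen.getD k []).getD j 0)) z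
        = List.replicate CB (0:Int) ++ (imagen.getD k []).take w ++ List.replicate CB (0:Int) := by
      rw [hz, show CB + w + CB = CB + (w + CB) by ring, List.replicate_add, List.replicate_add,
        ← List.append_assoc]
      have h1 := pvRowWrite (List.replicate w (0:Int)) (List.replicate CB (0:Int))
        (List.replicate CB (0:Int)) (fun j => (imagen.getD k []).getD j 0)
      simp only [List.length_replicate] at h1
      rw [h1, pvMapGetDRange _ _ hrowk]
    rw [hinner]
    rw [List.set_append_right _ _ (by simp [hlen2])]
    rw [show FB + k - (List.replicate FB z ++ mid).length = 0 by simp [hlen2]]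
    rw [show (n - k) + FB = ((n - (k+1)) + FB) + 1 by omega, List.replicate_succ, List.set_cons_zero]
    rw [List.take_add_one, List.getElem?_eq_getElem (by omega), List.map_append, List.append_assoc]
    simp [hmid, List.map_take, List.getElem?_eq_getElem (show k < imagen.length by omega)]


theorem pvFinal (filasFiltro columnasFiltro : Int) (imagen : List (List Int))
    (h1 : 1 ≤ filasFiltro) (h2 : 1 ≤ columnasFiltro) (hne : imagen ≠ [])
    (hw : ∀ row ∈ imagen, (imagen.headD []).length ≤ row.length) :
    agregaBordesFiltroEscalaGrises filasFiltro columnasFiltro imagen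
      = agregaBordesFiltroEscalaGrises_alt filasFiltro columnasFiltro imagen := by
  have hf0 : (0:Int) ≤ PySem.Int.floordiv (filasFiltro - 1) 2 := by
    rw [PySem.Int.floordiv_eq_ediv_of_pos (by norm_num)]
    exact Int.ediv_nonneg (by omega) (by norm_num)
  have hc0 : (0:Int) ≤ PySem.Int.floordiv (columnasFiltro - 1) 2 := by
    rw [PySem.Int.floordiv_eq_ediv_of_pos (by norm_num)]
    exact Int.ediv_nonneg (by omega) (by norm_num)
  set FB := (PySem.Int.floordiv (filasFiltro - 1) 2).toNat with hFB
  set CB := (PySem.Int.floordiv (columnasFiltro - 1) 2).toNat with hCB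
  have hfb : PySem.Int.floordiv (filasFiltro - 1) 2 = (FB : Int) := (Int.toNat_of_nonneg hf0).symm
  have hcb : PySem.Int.floordiv (columnasFiltro - 1) 2 = (CB : Int) := (Int.toNat_of_nonneg hc0).symm
  have hhead : imagen.headD [] = imagen.getD 0 [] := by cases imagen <;> simp
  set w := (imagen.getD 0 []).length with hwdef
  have hw' : ∀ row ∈ imagen, w ≤ row.length := by
    intro r hr; rw [← hhead] at hwdef; rw [hwdef]; exact hw r hr
  have hA : agregaBordesFiltroEscalaGrises filasFiltro columnasFiltro imagen
      = (List.range imagen.length).foldl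
          (fun acc i => (List.range w).foldl
            (fun acc2 j => acc2.set (FB+i) ((acc2.getD (FB+i) []).set (CB+j) ((imagen.getD i []).getD j 0)))
            acc)
          (List.replicate (FB + imagen.length + FB) (List.replicate (CB + w + CB) (0:Int))) := by
    simp only [agregaBordesFiltroEscalaGrises, hfb, hcb, PySem.List.pyGetD_zero]
    rw [show (FB:Int) + (imagen.length:Int) + (FB:Int) = ((FB + imagen.length + FB : ℕ) : Int) by push_cast; ring]
    rw [show (CB:Int) + ((imagen.getD 0 []).length:Int) + (CB:Int) = ((CB + w + CB : ℕ) : Int) by push_cast; ring]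
    rw [PySem.List.pyRange_zero_nat, PySem.List.pyRange_zero_nat, PySem.List.pyRange_zero_nat]
    simp only [List.foldl_map, List.map_map, Int.toNat_natCast,
      ← Nat.cast_add, PySem.List.pySetD_natCast, PySem.List.pyGetD_natCast]
    simp [Function.comp_def, List.map_const']
    rfl
  have hB : agregaBordesFiltroEscalaGrises_alt filasFiltro columnasFiltro imagen
      = List.replicate FB (List.replicate (CB+w+CB) (0:Int))
        ++ imagen.map (fun fila => List.replicate CB (0:Int) ++ fila.take w ++ List.replicate CB (0:Int))
        ++ List.replicate FB (List.replicate (CB+w+CB) (0:Int)) := by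
    simp only [agregaBordesFiltroEscalaGrises_alt, hfb, hcb, PySem.List.pyGetD_zero,
      PySem.List.slice_to_natCast]
    rw [show (CB:Int) + ((imagen.getD 0 []).length:Int) + (CB:Int) = ((CB + w + CB : ℕ) : Int) by push_cast; ring]
    rw [PySem.List.pyRange_zero_nat]
    simp only [List.map_map, Int.toNat_natCast]
    simp [Function.comp_def, List.map_const']
    intro a _
    rfl
  rw [hA, hB]
  have := pvOuter FB CB w imagen hw' imagen.length (le_refl _)
  rw [this, List.take_length, Nat.sub_self, Nat.zero_add]


-- ===== VERDICT (by name: the statement is the Claim_ definition above) =====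
theorem agregaBordesFiltroEscalaGrises_spec : Claim_equal_agregaBordesFiltroEscalaGrises := by
  intro filasFiltro columnasFiltro imagen _ hpre
  unfold Spec_agregaBordesFiltroEscalaGrises
  exact pvFinal filasFiltro columnasFiltro imagen hpre.2.2.1 hpre.2.2.2 hpre.1 hpre.2.1
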